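-- pv_equiv track=rewrite | github.com/MacHu-GWU/single_file_module-project | sfm/sqlalchemy_mate.py | grouper_list
-- ===== SOURCE A (Python) =====
-- def grouper_list(l, n):
--     """Evenly divide list into fixed-length piece, no filled value if chunk
--     size smaller than fixed-length.
--
--     Example::
--
--         >>> list(grouper(range(10), n=3)
--         [[0, 1, 2], [3, 4, 5], [6, 7, 8], [9]]
--
--     **中文文档**
--
--     将一个列表按照尺寸n, 依次打包输出, 有多少输出多少, 并不强制填充包的大小到n。
--
--     下列实现是按照性能从高到低进行排列的:
--
--     - 方法1: 建立一个counter, 在向chunk中添加元素时, 同时将counter与n比较, 如果一致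
--       则yield。然后在最后将剩余的item视情况yield。
--     - 方法2: 建立一个list, 每次添加一个元素, 并检查size。
--     - 方法3: 调用grouper()函数, 然后对里面的None元素进行清理。
--     """
--     chunk = list()
--     counter = 0
--     for item in l:
--         counter += 1
--         chunk.append(item)
--         if counter == n:
--             yield chunk
--             chunk = list()
--             counter = 0
--     if len(chunk) > 0:
--         yield chunk
-- ===== SOURCE B (Python) =====
-- from itertools import islice
--
--
-- def grouper_list(l, n):
--     it = iter(l)
--     while True:
--         chunk = list(islice(it, n))
--         if not chunk:
--             return
--         yield chunk
-- ===== Notes on version B (the rewrite author's own statement) =====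
-- stated objective: idiomatic
-- what changed: B pulls fixed-size batches from an explicit iterator with itertools.islice and stops on an empty batch, instead of A's per-item append-and-counter loop with a trailing leftover yield.
-- intended difference: On n == 0 with a nonempty list, A's counter (1,2,...) never equals n so A returns the whole list as one chunk [l] - an accident of the counter test - while B's first islice batch is empty so it returns [], the intended result for chunk size 0. — e.g. on grouper_list([1], 0): A returns [[1]], B returns []
-- outside the precondition, e.g. on grouper_list([1, 2], -1): A returns [[1, 2]], B raises ValueError
import Mathlib
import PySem

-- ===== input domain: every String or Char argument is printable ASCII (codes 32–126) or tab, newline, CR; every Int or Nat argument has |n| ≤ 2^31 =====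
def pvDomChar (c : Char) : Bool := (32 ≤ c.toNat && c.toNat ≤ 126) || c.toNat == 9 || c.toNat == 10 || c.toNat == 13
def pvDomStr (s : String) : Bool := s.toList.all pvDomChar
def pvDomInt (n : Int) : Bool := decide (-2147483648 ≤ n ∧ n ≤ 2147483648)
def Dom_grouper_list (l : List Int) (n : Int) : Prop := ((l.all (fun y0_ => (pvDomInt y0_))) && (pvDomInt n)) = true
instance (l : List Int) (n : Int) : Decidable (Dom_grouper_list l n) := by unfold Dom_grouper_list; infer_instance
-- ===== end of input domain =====

-- B replaces A's per-item append+counter loop by repeated fixed-size batch slicing from an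
-- explicit iterator (itertools.islice); equivalence is about list(...) of each generator.

-- ===== PORT A =====
-- one step of A's for-loop: state = (yielded chunks, current chunk, counter)
def grouperStep (n : Int) (st : List (List Int) × List Int × Int) (item : Int) :
    List (List Int) × List Int × Int :=
  let counter := st.2.2 + 1
  let chunk := st.2.1 ++ [item]
  if counter == n then (st.1 ++ [chunk], ([] : List Int), (0 : Int))
  else (st.1, chunk, counter)

def grouper_list (l : List Int) (n : Int) : List (List Int) :=
  let s := l.foldl (grouperStep n) ([], [], 0)
  if s.2.1.length > 0 then s.1 ++ [s.2.1] else s.1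

-- ===== PORT B =====
-- B's while-loop: `chunk = list(islice(it, n))` takes the next n elements of the rest;
-- an empty chunk stops. `fuel = l.length` only totalizes the loop (it never limits it,
-- since each pass with m ≥ 1 consumes ≥ 1 element).
def grouperBatches (fuel : Nat) (m : Nat) (l : List Int) : List (List Int) :=
  match fuel, l with
  | _, [] => []
  | 0, _ => []
  | f + 1, x :: xs => ((x :: xs).take m) :: grouperBatches f m ((x :: xs).drop m)

-- For n < 0 the Python B raises ValueError in islice (outside Pre_); the port returns [] there.
-- For n = 0 the first chunk is empty and B stops at once with [].
def grouper_list_alt (l : List Int) (n : Int) : List (List Int) :=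
  if n ≤ 0 then [] else grouperBatches l.length n.toNat l

-- ===== PRECONDITION & SPEC =====
-- Pre_ excludes n < 0, where B's islice raises ValueError (A returns the whole list as one chunk there).
def Pre_grouper_list (l : List Int) (n : Int) : Prop := 0 ≤ n
instance (l : List Int) (n : Int) : Decidable (Pre_grouper_list l n) := by
  unfold Pre_grouper_list; infer_instance

def pvWitness_grouper_list : List Int × Int := ([1, 2, 3, 4, 5], 2)

-- On n = 0 with a nonempty list, A's counter (1,2,…) never hits n so A returns the whole list as
-- one chunk [l] — an accident of the counter test — while B yields no chunks and returns [],
-- the intended result for chunk size 0.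
def D_grouper_list (l : List Int) (n : Int) : Prop := n = 0 ∧ l ≠ []
instance (l : List Int) (n : Int) : Decidable (D_grouper_list l n) := by
  unfold D_grouper_list; infer_instance

def Spec_grouper_list (l : List Int) (n : Int) (out : List (List Int)) : Prop :=
  ¬ D_grouper_list l n → out = grouper_list_alt l n
instance (l : List Int) (n : Int) (out : List (List Int)) : Decidable (Spec_grouper_list l n out) := by
  unfold Spec_grouper_list; infer_instance

def pvDiffWitness_grouper_list : List Int × Int := ([1], 0)
def pvDiffWitnessOut_grouper_list : (List (List Int)) × (List (List Int)) := ([[1]], [])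

-- ===== CLAIM (what is proved, stated in full; the proofs are below) =====
def Claim_unchanged_grouper_list : Prop := ∀ (l : List Int) (n : Int), Dom_grouper_list l n → Pre_grouper_list l n → Spec_grouper_list l n (grouper_list l n)
def Claim_changed_grouper_list : Prop := Dom_grouper_list (pvDiffWitness_grouper_list.1) (pvDiffWitness_grouper_list.2) ∧ Pre_grouper_list (pvDiffWitness_grouper_list.1) (pvDiffWitness_grouper_list.2) ∧ D_grouper_list (pvDiffWitness_grouper_list.1) (pvDiffWitness_grouper_list.2) ∧ grouper_list (pvDiffWitness_grouper_list.1) (pvDiffWitness_grouper_list.2) = pvDiffWitnessOut_grouper_list.1 ∧ grouper_list_alt (pvDiffWitness_grouper_list.1) (pvDiffWitness_grouper_list.2) = pvDiffWitnessOut_grouper_list.2 ∧ pvDiffWitnessOut_grouper_list.1 ≠ pvDiffWitnessOut_grouper_list.2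
def Claim_exact_grouper_list : Prop := ∀ (l : List Int) (n : Int), Dom_grouper_list l n → Pre_grouper_list l n → D_grouper_list l n → grouper_list l n ≠ grouper_list_alt l n

-- ===== LEMMAS AND PROOFS =====

-- fuel irrelevance: any fuel ≥ l.length computes the same batches (m ≥ 1)
theorem grouperBatches_fuel (m : Nat) (hm : 1 ≤ m) :
    ∀ (f1 : Nat) (l : List Int) (f2 : Nat), l.length ≤ f1 → l.length ≤ f2 →
      grouperBatches f1 m l = grouperBatches f2 m l := by
  intro f1
  induction f1 with
  | zero =>
    intro l f2 h1 _
    have : l = [] := List.eq_nil_of_length_eq_zero (by omega)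
    subst this
    cases f2 <;> rfl
  | succ f ih =>
    intro l f2 h1 h2
    cases l with
    | nil => cases f2 <;> rfl
    | cons x xs =>
      cases f2 with
      | zero => simp at h2
      | succ g =>
        show ((x :: xs).take m) :: grouperBatches f m ((x :: xs).drop m)
           = ((x :: xs).take m) :: grouperBatches g m ((x :: xs).drop m)
        congr 1
        apply ih
        · simp only [List.length_drop, List.length_cons] at *; omega
        · simp only [List.length_drop, List.length_cons] at *; omega

theorem alt_nil (n : Int) : grouper_list_alt [] n = [] := by
  unfold grouper_list_alt
  split <;> rfl

theorem alt_cons (n : Int) (hn : 1 ≤ n) (x : Int) (xs : List Int) :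
    grouper_list_alt (x :: xs) n
      = ((x :: xs).take n.toNat) :: grouper_list_alt ((x :: xs).drop n.toNat) n := by
  unfold grouper_list_alt
  rw [if_neg (by omega), if_neg (by omega)]
  show ((x :: xs).take n.toNat) :: grouperBatches xs.length n.toNat ((x :: xs).drop n.toNat)
     = ((x :: xs).take n.toNat) :: grouperBatches ((x :: xs).drop n.toNat).length n.toNat ((x :: xs).drop n.toNat)
  congr 1
  apply grouperBatches_fuel n.toNat (by omega)
  · simp; omega
  · simp

-- finishing step of A's loop (the trailing `if len(chunk) > 0: yield chunk`)
def grouperFinish (s : List (List Int) × List Int × Int) : List (List Int) :=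
  if s.2.1.length > 0 then s.1 ++ [s.2.1] else s.1

-- what the rest of A's run produces, phrased with B's chunking: current chunk `chunk`, rest `l`
def groupFrom (n : Int) (chunk l : List Int) : List (List Int) :=
  if l.length < (n - chunk.length).toNat then
    (if chunk ++ l = [] then [] else [chunk ++ l])
  else (chunk ++ l.take (n - chunk.length).toNat) ::
       grouper_list_alt (l.drop (n - chunk.length).toNat) n

theorem groupFrom_nil_chunk (n : Int) (l : List Int) (hn : 1 ≤ n) :
    groupFrom n [] l = grouper_list_alt l n := by
  cases l with
  | nil => simp [groupFrom, alt_nil]; omega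
  | cons x xs =>
    rw [groupFrom]
    simp only [List.length_nil, Int.natCast_zero, sub_zero]
    by_cases h : (x :: xs).length < n.toNat
    · rw [if_pos h, if_neg (by simp)]
      rw [alt_cons n hn x xs]
      have ht : (x :: xs).take n.toNat = x :: xs := List.take_of_length_le (by omega)
      have hd : (x :: xs).drop n.toNat = [] := List.drop_eq_nil_of_le (by omega)
      rw [ht, hd, alt_nil]
      simp
    · rw [if_neg h, alt_cons n hn x xs]
      simp

theorem grouper_loop (n : Int) (hn : 1 ≤ n) :
    ∀ (l : List Int) (acc : List (List Int)) (chunk : List Int), (chunk.length : Int) < n →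
      grouperFinish (l.foldl (grouperStep n) (acc, chunk, (chunk.length : Int))) =
        acc ++ groupFrom n chunk l := by
  intro l
  induction l with
  | nil =>
    intro acc chunk hc
    rw [List.foldl_nil, groupFrom, if_pos (by simp only [List.length_nil]; omega)]
    unfold grouperFinish
    cases chunk with
    | nil => simp
    | cons c cs => simp
  | cons x xs ih =>
    intro acc chunk hc
    rw [List.foldl_cons]
    by_cases heq : (chunk.length : Int) + 1 = n
    · have hstep : grouperStep n (acc, chunk, (chunk.length : Int)) x =
        (acc ++ [chunk ++ [x]], ([] : List Int), (0 : Int)) := by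
        simp [grouperStep, heq]
      rw [hstep]
      have h0 : ((0 : Int)) = (([] : List Int).length : Int) := by simp
      rw [h0, ih (acc ++ [chunk ++ [x]]) [] (by simp; omega)]
      rw [groupFrom_nil_chunk n xs hn]
      rw [groupFrom]
      have hk : (n - (chunk.length : Int)).toNat = 1 := by omega
      rw [hk]
      rw [if_neg (by simp)]
      simp
    · have hstep : grouperStep n (acc, chunk, (chunk.length : Int)) x =
        (acc, chunk ++ [x], (chunk.length : Int) + 1) := by
        simp [grouperStep]
        intro h; exact absurd h heq
      rw [hstep]
      have h1 : (chunk.length : Int) + 1 = ((chunk ++ [x]).length : Int) := by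
        simp
      rw [h1, ih acc (chunk ++ [x]) (by simp; omega)]
      congr 1
      have hk2 : 2 ≤ (n - (chunk.length : Int)).toNat := by omega
      have hk' : (n - ((chunk ++ [x]).length : Int)).toNat
          = (n - (chunk.length : Int)).toNat - 1 := by simp; omega
      rw [groupFrom, groupFrom, hk']
      set k := (n - (chunk.length : Int)).toNat with hkdef
      by_cases hlen : xs.length < k - 1
      · rw [if_pos hlen, if_pos (show (x :: xs).length < k by
          simp only [List.length_cons]; omega)]
        simp
      · rw [if_neg hlen, if_neg (show ¬ (x :: xs).length < k by
          simp only [List.length_cons]; omega)]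
        have htake : (x :: xs).take k = x :: xs.take (k - 1) := by
          cases hek : k with
          | zero => omega
          | succ m => simp [List.take_succ_cons]
        have hdrop : (x :: xs).drop k = xs.drop (k - 1) := by
          cases hek : k with
          | zero => omega
          | succ m => simp [List.drop_succ_cons]
        rw [htake, hdrop]
        simp

theorem grouper_zero (l : List Int) (hl : l ≠ []) :
    grouper_list l 0 = [l] := by
  have key : ∀ (m : List Int) (acc : List (List Int)) (chunk : List Int),
      m.foldl (grouperStep 0) (acc, chunk, (chunk.length : Int)) =
        (acc, chunk ++ m, ((chunk ++ m).length : Int)) := by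
    intro m
    induction m with
    | nil => intro acc chunk; simp
    | cons x xs ih =>
      intro acc chunk
      rw [List.foldl_cons]
      have hstep : grouperStep 0 (acc, chunk, (chunk.length : Int)) x =
          (acc, chunk ++ [x], (chunk.length : Int) + 1) := by
        simp [grouperStep]
        omega
      rw [hstep]
      have h1 : (chunk.length : Int) + 1 = ((chunk ++ [x]).length : Int) := by simp
      rw [h1, ih acc (chunk ++ [x])]
      simp
  show grouperFinish (l.foldl (grouperStep 0) ([], [], 0)) = [l]
  have h := key l [] []
  simp only [List.length_nil, Int.natCast_zero, List.nil_append] at h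
  rw [h]
  simp [grouperFinish]
  intro h
  exact absurd h hl

-- ===== VERDICT (by name: the statement is the Claim_ definition above) =====
theorem grouper_list_spec : Claim_unchanged_grouper_list := by
  intro l n _ hpre hnd
  by_cases hn : 1 ≤ n
  · show grouperFinish (l.foldl (grouperStep n) ([], [], 0)) = grouper_list_alt l n
    have h := grouper_loop n hn l [] [] (by simp only [List.length_nil]; omega)
    simp only [List.length_nil, Int.natCast_zero] at h
    rw [h, groupFrom_nil_chunk n l hn]
    simp
  · have hn0 : n = 0 := by
      unfold Pre_grouper_list at hpre; omega
    have hl : l = [] := by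
      by_contra h
      exact hnd ⟨hn0, h⟩
    subst hn0; subst hl
    decide

theorem grouper_list_changed : Claim_changed_grouper_list := by
  unfold Claim_changed_grouper_list; decide

theorem grouper_list_tight : Claim_exact_grouper_list := by
  intro l n _ _ hd
  obtain ⟨hn0, hl⟩ := hd
  subst hn0
  rw [grouper_zero l hl]
  simp [grouper_list_alt]
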